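-- pv_equiv track=rewrite | github.com/justjo3l/aoc-2024 | day14/day14-1.py | calculate_quadrants
-- ===== SOURCE A (Python) =====
-- import math
--
-- def calculate_quadrants(r, c, grid):
--     rh = r // 2
--     ch = c // 2
--     qs = [0, 0, 0, 0]
--     for i in range(r):
--         for j in range(c):
--             curr = grid[i][j]
--             if curr.isnumeric():
--                 if i < rh:
--                     if j < ch:
--                         qs[0] += int(curr)
--                     elif j == ch:
--                         continue
--                     else:
--                         qs[1] += int(curr)
--                 elif i == rh:
--                     continue
--                 else:
--                     if j < ch:
--                         qs[3] += int(curr)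
--                     elif j == ch:
--                         continue
--                     else:
--                         qs[2] += int(curr)
--     return math.prod(qs)
-- ===== SOURCE B (Python) =====
-- def calculate_quadrants(r, c, grid):
--     rh = r // 2
--     ch = c // 2
--
--     def region(rlo, rhi, clo, chi):
--         total = 0
--         for i in range(rlo, rhi):
--             for j in range(clo, chi):
--                 cell = grid[i][j]
--                 if cell.isnumeric():
--                     total += int(cell)
--         return total
--
--     q0 = region(0, rh, 0, ch)
--     q1 = region(0, rh, ch + 1, c)
--     q2 = region(rh + 1, r, ch + 1, c)
--     q3 = region(rh + 1, r, 0, ch)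
--     return q0 * q1 * q2 * q3
-- ===== Notes on version B (the rewrite author's own statement) =====
-- stated objective: simpler
-- what changed: Replaces the single full-grid scan with per-cell branch dispatch by four independent rectangular region sums (the middle row/column excluded by the range bounds instead of continue), multiplied at the end.
import Mathlib
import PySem

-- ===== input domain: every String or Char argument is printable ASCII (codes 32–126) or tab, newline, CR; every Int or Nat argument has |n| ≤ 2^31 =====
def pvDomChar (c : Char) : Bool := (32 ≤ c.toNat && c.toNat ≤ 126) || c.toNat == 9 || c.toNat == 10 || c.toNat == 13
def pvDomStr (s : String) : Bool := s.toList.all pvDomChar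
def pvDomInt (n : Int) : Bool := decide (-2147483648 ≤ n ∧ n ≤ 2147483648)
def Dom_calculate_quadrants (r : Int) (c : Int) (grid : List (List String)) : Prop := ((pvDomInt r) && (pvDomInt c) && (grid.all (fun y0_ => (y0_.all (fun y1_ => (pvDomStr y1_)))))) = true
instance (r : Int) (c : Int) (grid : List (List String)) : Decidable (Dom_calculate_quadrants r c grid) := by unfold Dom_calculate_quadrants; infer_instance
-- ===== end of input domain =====

-- B computes the four quadrant totals as independent sums over rectangular index ranges
-- (the middle row/column fall outside the range bounds instead of being skipped by continue): simpler decomposition, same cost.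

-- ===== PORT A =====
-- curr.isnumeric() is ported as strIsdigit (exact on the ASCII input domain);
-- int(curr) as (ofStr? curr).getD 0 — the default is unreachable, the guard ensures curr is all digits.
def calculate_quadrants (r : Int) (c : Int) (grid : List (List String)) : Int :=
  let rh := PySem.Int.floordiv r 2
  let ch := PySem.Int.floordiv c 2
  let qs : Int × Int × Int × Int :=
    (PySem.List.pyRange 0 r 1).foldl (fun qs i =>
      (PySem.List.pyRange 0 c 1).foldl (fun qs j =>
        let curr := PySem.List.pyGetD (PySem.List.pyGetD grid i []) j ""
        if PySem.Str.strIsdigit curr then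
          if i < rh then
            if j < ch then (qs.1 + (PySem.Int.ofStr? curr).getD 0, qs.2.1, qs.2.2.1, qs.2.2.2)
            else if j = ch then qs
            else (qs.1, qs.2.1 + (PySem.Int.ofStr? curr).getD 0, qs.2.2.1, qs.2.2.2)
          else if i = rh then qs
          else
            if j < ch then (qs.1, qs.2.1, qs.2.2.1, qs.2.2.2 + (PySem.Int.ofStr? curr).getD 0)
            else if j = ch then qs
            else (qs.1, qs.2.1, qs.2.2.1 + (PySem.Int.ofStr? curr).getD 0, qs.2.2.2)
        else qs) qs) (0, 0, 0, 0)
  qs.1 * qs.2.1 * qs.2.2.1 * qs.2.2.2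

-- ===== PORT B =====
-- helper = Source B's local 'region(rows, cols)'
def pvRegionSum (grid : List (List String)) (rlo rhi clo chi : Int) : Int :=
  (PySem.List.pyRange rlo rhi 1).foldl (fun total i =>
    (PySem.List.pyRange clo chi 1).foldl (fun total j =>
      let cell := PySem.List.pyGetD (PySem.List.pyGetD grid i []) j ""
      if PySem.Str.strIsdigit cell then total + (PySem.Int.ofStr? cell).getD 0 else total) total) 0

def calculate_quadrants_alt (r : Int) (c : Int) (grid : List (List String)) : Int :=
  let rh := PySem.Int.floordiv r 2
  let ch := PySem.Int.floordiv c 2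
  let q0 := pvRegionSum grid 0 rh 0 ch
  let q1 := pvRegionSum grid 0 rh (ch + 1) c
  let q2 := pvRegionSum grid (rh + 1) r (ch + 1) c
  let q3 := pvRegionSum grid (rh + 1) r 0 ch
  q0 * q1 * q2 * q3

-- ===== PRECONDITION & SPEC =====
-- Pre_ = exactly the inputs where Python A returns normally: grid[i][j] is read for every
-- 0 ≤ i < r, 0 ≤ j < c, and only when the inner loop runs at all (0 < c).
def Pre_calculate_quadrants (r : Int) (c : Int) (grid : List (List String)) : Prop :=
  0 < c → (r ≤ grid.length ∧ ∀ row ∈ grid.take r.toNat, c ≤ row.length)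
instance (r : Int) (c : Int) (grid : List (List String)) : Decidable (Pre_calculate_quadrants r c grid) := by unfold Pre_calculate_quadrants; infer_instance

def pvWitness_calculate_quadrants : Int × Int × List (List String) :=
  (3, 3, [["1", "x", "2"], ["", "9", "10"], ["3", " 4", "5"]])

def Spec_calculate_quadrants (r : Int) (c : Int) (grid : List (List String)) (out : Int) : Prop := out = calculate_quadrants_alt r c grid
instance (r : Int) (c : Int) (grid : List (List String)) (out : Int) : Decidable (Spec_calculate_quadrants r c grid out) := by unfold Spec_calculate_quadrants; infer_instance

-- ===== CLAIM (what is proved, stated in full; the proofs are below) =====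
def Claim_equal_calculate_quadrants : Prop := ∀ (r : Int) (c : Int) (grid : List (List String)), Dom_calculate_quadrants r c grid → Pre_calculate_quadrants r c grid → Spec_calculate_quadrants r c grid (calculate_quadrants r c grid)

-- ===== LEMMAS AND PROOFS =====

-- value contributed by cell (i, j); 0 for non-digit cells
def pvF (grid : List (List String)) (i j : Int) : Int :=
  let cell := PySem.List.pyGetD (PySem.List.pyGetD grid i []) j ""
  if PySem.Str.strIsdigit cell then (PySem.Int.ofStr? cell).getD 0 else 0

def pvRow (grid : List (List String)) (i : Int) (cols : List Int) : Int :=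
  (cols.map (pvF grid i)).sum

def pvS (grid : List (List String)) (rows cols : List Int) : Int :=
  (rows.map (fun i => pvRow grid i cols)).sum

-- A's inner-loop step, verbatim
def pvStepA (grid : List (List String)) (rh ch i : Int) (qs : Int × Int × Int × Int) (j : Int) : Int × Int × Int × Int :=
  let curr := PySem.List.pyGetD (PySem.List.pyGetD grid i []) j ""
  if PySem.Str.strIsdigit curr then
    if i < rh then
      if j < ch then (qs.1 + (PySem.Int.ofStr? curr).getD 0, qs.2.1, qs.2.2.1, qs.2.2.2)
      else if j = ch then qs
      else (qs.1, qs.2.1 + (PySem.Int.ofStr? curr).getD 0, qs.2.2.1, qs.2.2.2)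
    else if i = rh then qs
    else
      if j < ch then (qs.1, qs.2.1, qs.2.2.1, qs.2.2.2 + (PySem.Int.ofStr? curr).getD 0)
      else if j = ch then qs
      else (qs.1, qs.2.1, qs.2.2.1 + (PySem.Int.ofStr? curr).getD 0, qs.2.2.2)
  else qs

lemma calcA_eq (r c : Int) (grid : List (List String)) :
    calculate_quadrants r c grid =
      (let qs := (PySem.List.pyRange 0 r 1).foldl (fun qs i =>
          (PySem.List.pyRange 0 c 1).foldl
            (pvStepA grid (PySem.Int.floordiv r 2) (PySem.Int.floordiv c 2) i) qs) (0, 0, 0, 0)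
       qs.1 * qs.2.1 * qs.2.2.1 * qs.2.2.2) := rfl

-- B reduces to sums of pvF over its rectangles
lemma regionSum_eq (grid : List (List String)) (rlo rhi clo chi : Int) :
    pvRegionSum grid rlo rhi clo chi
      = pvS grid (PySem.List.pyRange rlo rhi 1) (PySem.List.pyRange clo chi 1) := by
  unfold pvRegionSum pvS
  set rows := PySem.List.pyRange rlo rhi 1
  set cols := PySem.List.pyRange clo chi 1
  have hinner : ∀ (i : Int) (cs : List Int) (t : Int),
      cs.foldl (fun total j =>
        let cell := PySem.List.pyGetD (PySem.List.pyGetD grid i []) j ""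
        if PySem.Str.strIsdigit cell then total + (PySem.Int.ofStr? cell).getD 0 else total) t
        = t + pvRow grid i cs := by
    intro i cs
    induction cs with
    | nil => intro t; simp [pvRow]
    | cons j js ih =>
      intro t
      simp only [List.foldl_cons, ih, pvRow, List.map_cons, List.sum_cons, pvF]
      split_ifs <;> ring
  simp only [hinner]
  rw [PySem.List.foldl_add (g := fun i => pvRow grid i cols)]
  simp

-- one step of A, expressed through pvF
lemma stepA_char (grid : List (List String)) (rh ch i : Int) (qs : Int × Int × Int × Int) (j : Int) :
    pvStepA grid rh ch i qs j =
      if i < rh then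
        (if j < ch then (qs.1 + pvF grid i j, qs.2.1, qs.2.2.1, qs.2.2.2)
         else if j = ch then qs
         else (qs.1, qs.2.1 + pvF grid i j, qs.2.2.1, qs.2.2.2))
      else if i = rh then qs
      else
        (if j < ch then (qs.1, qs.2.1, qs.2.2.1, qs.2.2.2 + pvF grid i j)
         else if j = ch then qs
         else (qs.1, qs.2.1, qs.2.2.1 + pvF grid i j, qs.2.2.2)) := by
  unfold pvStepA pvF
  by_cases hd : PySem.Str.strIsdigit (PySem.List.pyGetD (PySem.List.pyGetD grid i []) j "") = true
  · simp only [hd, if_true]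
  · simp only [hd, Bool.false_eq_true, if_false]
    split_ifs <;> simp

-- A's inner loop, i < rh
lemma innerA_lt (grid : List (List String)) (rh ch i c : Int)
    (hi : i < rh) (hc : 0 < c) (hch : ch = PySem.Int.floordiv c 2) (q : Int × Int × Int × Int) :
    (PySem.List.pyRange 0 c 1).foldl (pvStepA grid rh ch i) q
      = (q.1 + pvRow grid i (PySem.List.pyRange 0 ch 1),
         q.2.1 + pvRow grid i (PySem.List.pyRange (ch + 1) c 1),
         q.2.2.1, q.2.2.2) := by
  have h2 : (0:Int) < 2 := by omega
  have hce : ch = c / 2 := by rw [hch, PySem.Int.floordiv_eq_ediv_of_pos h2]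
  have h0ch : (0:Int) ≤ ch := by omega
  have hchc : ch < c := by omega
  rw [PySem.List.pyRange_one_append 0 ch c h0ch (by omega),
      PySem.List.pyRange_one_cons hchc, List.foldl_append, List.foldl_cons]
  have hlo : ∀ (cs : List Int), (∀ j ∈ cs, j < ch) → ∀ q : Int × Int × Int × Int,
      cs.foldl (pvStepA grid rh ch i) q = (q.1 + pvRow grid i cs, q.2.1, q.2.2.1, q.2.2.2) := by
    intro cs
    induction cs with
    | nil => intro _ q; simp [pvRow]
    | cons j js ih =>
      intro hmem q
      have hj : j < ch := hmem j (by simp)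
      simp only [List.foldl_cons, stepA_char, if_pos hi, if_pos hj]
      rw [ih (fun x hx => hmem x (by simp [hx]))]
      simp only [pvRow, List.map_cons, List.sum_cons]
      refine Prod.ext (by ring) rfl
  have hhi : ∀ (cs : List Int), (∀ j ∈ cs, ch < j) → ∀ q : Int × Int × Int × Int,
      cs.foldl (pvStepA grid rh ch i) q = (q.1, q.2.1 + pvRow grid i cs, q.2.2.1, q.2.2.2) := by
    intro cs
    induction cs with
    | nil => intro _ q; simp [pvRow]
    | cons j js ih =>
      intro hmem q
      have hj : ch < j := hmem j (by simp)
      simp only [List.foldl_cons, stepA_char, if_pos hi, if_neg (by omega : ¬ j < ch),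
        if_neg (by omega : ¬ j = ch)]
      rw [ih (fun x hx => hmem x (by simp [hx]))]
      simp only [pvRow, List.map_cons, List.sum_cons]
      refine Prod.ext rfl (Prod.ext (by ring) rfl)
  rw [hlo _ (fun j hj => (PySem.List.mem_pyRange_one.mp hj).2) q]
  rw [stepA_char, if_pos hi, if_neg (by omega : ¬ ch < ch), if_pos rfl]
  rw [hhi _ (fun j hj => (PySem.List.mem_pyRange_one.mp hj).1) _]

-- A's inner loop, i = rh: every step is the identity
lemma innerA_eq (grid : List (List String)) (rh ch : Int) (cols : List Int) (q : Int × Int × Int × Int) :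
    cols.foldl (pvStepA grid rh ch rh) q = q := by
  induction cols generalizing q with
  | nil => rfl
  | cons j js ih =>
    have h1 : pvStepA grid rh ch rh q j = q := by rw [stepA_char]; simp
    rw [List.foldl_cons, h1]; exact ih q

-- A's inner loop, rh < i
lemma innerA_gt (grid : List (List String)) (rh ch i c : Int)
    (hi : rh < i) (hc : 0 < c) (hch : ch = PySem.Int.floordiv c 2) (q : Int × Int × Int × Int) :
    (PySem.List.pyRange 0 c 1).foldl (pvStepA grid rh ch i) q
      = (q.1, q.2.1,
         q.2.2.1 + pvRow grid i (PySem.List.pyRange (ch + 1) c 1),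
         q.2.2.2 + pvRow grid i (PySem.List.pyRange 0 ch 1)) := by
  have h2 : (0:Int) < 2 := by omega
  have hce : ch = c / 2 := by rw [hch, PySem.Int.floordiv_eq_ediv_of_pos h2]
  have h0ch : (0:Int) ≤ ch := by omega
  have hchc : ch < c := by omega
  rw [PySem.List.pyRange_one_append 0 ch c h0ch (by omega),
      PySem.List.pyRange_one_cons hchc, List.foldl_append, List.foldl_cons]
  have hlo : ∀ (cs : List Int), (∀ j ∈ cs, j < ch) → ∀ q : Int × Int × Int × Int,
      cs.foldl (pvStepA grid rh ch i) q = (q.1, q.2.1, q.2.2.1, q.2.2.2 + pvRow grid i cs) := by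
    intro cs
    induction cs with
    | nil => intro _ q; simp [pvRow]
    | cons j js ih =>
      intro hmem q
      have hj : j < ch := hmem j (by simp)
      simp only [List.foldl_cons, stepA_char, if_neg (by omega : ¬ i < rh),
        if_neg (by omega : ¬ i = rh), if_pos hj]
      rw [ih (fun x hx => hmem x (by simp [hx]))]
      simp only [pvRow, List.map_cons, List.sum_cons]
      refine Prod.ext rfl (Prod.ext rfl (Prod.ext rfl (by ring)))
  have hhi : ∀ (cs : List Int), (∀ j ∈ cs, ch < j) → ∀ q : Int × Int × Int × Int,
      cs.foldl (pvStepA grid rh ch i) q = (q.1, q.2.1, q.2.2.1 + pvRow grid i cs, q.2.2.2) := by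
    intro cs
    induction cs with
    | nil => intro _ q; simp [pvRow]
    | cons j js ih =>
      intro hmem q
      have hj : ch < j := hmem j (by simp)
      simp only [List.foldl_cons, stepA_char, if_neg (by omega : ¬ i < rh),
        if_neg (by omega : ¬ i = rh), if_neg (by omega : ¬ j < ch), if_neg (by omega : ¬ j = ch)]
      rw [ih (fun x hx => hmem x (by simp [hx]))]
      simp only [pvRow, List.map_cons, List.sum_cons]
      refine Prod.ext rfl (Prod.ext rfl (Prod.ext (by ring) rfl))
  rw [hlo _ (fun j hj => (PySem.List.mem_pyRange_one.mp hj).2) q]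
  rw [stepA_char, if_neg (by omega : ¬ i < rh), if_neg (by omega : ¬ i = rh),
      if_neg (by omega : ¬ ch < ch), if_pos rfl]
  rw [hhi _ (fun j hj => (PySem.List.mem_pyRange_one.mp hj).1) _]

-- A's outer loop over rows above the middle row
lemma outerA_lt (grid : List (List String)) (rh ch c : Int)
    (hc : 0 < c) (hch : ch = PySem.Int.floordiv c 2) :
    ∀ (rs : List Int), (∀ i ∈ rs, i < rh) → ∀ q : Int × Int × Int × Int,
      rs.foldl (fun qs i => (PySem.List.pyRange 0 c 1).foldl (pvStepA grid rh ch i) qs) q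
        = (q.1 + pvS grid rs (PySem.List.pyRange 0 ch 1),
           q.2.1 + pvS grid rs (PySem.List.pyRange (ch + 1) c 1),
           q.2.2.1, q.2.2.2) := by
  intro rs
  induction rs with
  | nil => intro _ q; simp [pvS]
  | cons i is ih =>
    intro hmem q
    rw [List.foldl_cons, innerA_lt grid rh ch i c (hmem i (by simp)) hc hch,
        ih (fun x hx => hmem x (by simp [hx]))]
    simp only [pvS, List.map_cons, List.sum_cons]
    refine Prod.ext (by ring) (Prod.ext (by ring) rfl)

-- A's outer loop over rows below the middle row
lemma outerA_gt (grid : List (List String)) (rh ch c : Int)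
    (hc : 0 < c) (hch : ch = PySem.Int.floordiv c 2) :
    ∀ (rs : List Int), (∀ i ∈ rs, rh < i) → ∀ q : Int × Int × Int × Int,
      rs.foldl (fun qs i => (PySem.List.pyRange 0 c 1).foldl (pvStepA grid rh ch i) qs) q
        = (q.1, q.2.1,
           q.2.2.1 + pvS grid rs (PySem.List.pyRange (ch + 1) c 1),
           q.2.2.2 + pvS grid rs (PySem.List.pyRange 0 ch 1)) := by
  intro rs
  induction rs with
  | nil => intro _ q; simp [pvS]
  | cons i is ih =>
    intro hmem q
    rw [List.foldl_cons, innerA_gt grid rh ch i c (hmem i (by simp)) hc hch,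
        ih (fun x hx => hmem x (by simp [hx]))]
    simp only [pvS, List.map_cons, List.sum_cons]
    refine Prod.ext rfl (Prod.ext rfl (Prod.ext (by ring) (by ring)))

-- ===== VERDICT (by name: the statement is the Claim_ definition above) =====
theorem calculate_quadrants_spec : Claim_equal_calculate_quadrants := by
  intro r c grid _ _
  unfold Spec_calculate_quadrants
  rw [calcA_eq]
  unfold calculate_quadrants_alt
  simp only [regionSum_eq]
  by_cases hr : 0 < r
  · by_cases hc : 0 < c
    · have hrh : PySem.Int.floordiv r 2 = r / 2 := PySem.Int.floordiv_eq_ediv_of_pos (by omega)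
      have hchv : PySem.Int.floordiv c 2 = c / 2 := PySem.Int.floordiv_eq_ediv_of_pos (by omega)
      set rh := PySem.Int.floordiv r 2 with hrhdef
      set ch := PySem.Int.floordiv c 2 with hchdef
      have hrh0 : 0 ≤ rh := by omega
      have hrhr : rh < r := by omega
      rw [PySem.List.pyRange_one_append 0 rh r hrh0 (by omega), PySem.List.pyRange_one_cons hrhr,
          List.foldl_append, List.foldl_cons]
      rw [outerA_lt grid rh ch c hc hchdef _
            (fun i hi => (PySem.List.mem_pyRange_one.mp hi).2)]
      rw [innerA_eq]
      rw [outerA_gt grid rh ch c hc hchdef _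
            (fun i hi => (PySem.List.mem_pyRange_one.mp hi).1)]
      simp
    · -- c ≤ 0: the inner loop never runs, every quadrant range is empty; both sides are 0
      have hchv : PySem.Int.floordiv c 2 = c / 2 := PySem.Int.floordiv_eq_ediv_of_pos (by omega)
      have h1 : PySem.List.pyRange 0 c 1 = [] := PySem.List.pyRange_one_eq_nil (by omega)
      have h2 : PySem.List.pyRange 0 (PySem.Int.floordiv c 2) 1 = [] :=
        PySem.List.pyRange_one_eq_nil (by omega)
      have h3 : PySem.List.pyRange (PySem.Int.floordiv c 2 + 1) c 1 = [] :=
        PySem.List.pyRange_one_eq_nil (by omega)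
      rw [h1, h2, h3]
      simp [pvS, pvRow]
  · -- r ≤ 0: no rows at all; both sides are 0
    have hrh : PySem.Int.floordiv r 2 = r / 2 := PySem.Int.floordiv_eq_ediv_of_pos (by omega)
    have h1 : PySem.List.pyRange 0 r 1 = [] := PySem.List.pyRange_one_eq_nil (by omega)
    have h2 : PySem.List.pyRange 0 (PySem.Int.floordiv r 2) 1 = [] :=
      PySem.List.pyRange_one_eq_nil (by omega)
    have h3 : PySem.List.pyRange (PySem.Int.floordiv r 2 + 1) r 1 = [] :=
      PySem.List.pyRange_one_eq_nil (by omega)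
    rw [h1, h2, h3]
    simp [pvS]
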